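-- pv_equiv track=rewrite | github.com/davidorvek/pitch-class-set-tools | music.py | DVLS
-- ===== SOURCE A (Python) =====
-- def DVLS(x, y):
--         if len(x) > len(y):
--                 n = len(x) - len(y)
--                 for _ in range(n):
--                         y.append(0)
--         elif len(y) > len(x):
--                 n = len(y) - len(x)
--                 for _ in range(n):
--                         x.append(0)
--         else:
--                 pass
--         total = 0
--         for a, b in zip(x, y):
--                 total += ((b - a) % 12)
--         return (total % 12)
-- ===== SOURCE B (Python) =====
-- def DVLS(x, y):
--     # No pairing and no padding: sum_i ((y_i - x_i) % 12) taken mod 12 equals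
--     # (sum(y) - sum(x)) % 12, and the zeros A appends change neither sum,
--     # so the whole computation collapses to one aggregate identity.
--     # NOTE: unlike A, this does not mutate (pad) the shorter input list;
--     # equivalence claimed for the RETURN VALUE only.
--     return (sum(y) - sum(x)) % 12
-- ===== Notes on version B (the rewrite author's own statement) =====
-- stated objective: simpler
-- what changed: Eliminates both the length-equalising padding stage and the zip/per-element mod-12 loop: since appended zeros change neither sum and residue sums mod 12 equal the mod of the sum difference, B is the single closed form (sum(y)-sum(x)) % 12 with no branching, no padding and no pairing; A's in-place mutation of the shorter list is not reproduced (return value only).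
import Mathlib
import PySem

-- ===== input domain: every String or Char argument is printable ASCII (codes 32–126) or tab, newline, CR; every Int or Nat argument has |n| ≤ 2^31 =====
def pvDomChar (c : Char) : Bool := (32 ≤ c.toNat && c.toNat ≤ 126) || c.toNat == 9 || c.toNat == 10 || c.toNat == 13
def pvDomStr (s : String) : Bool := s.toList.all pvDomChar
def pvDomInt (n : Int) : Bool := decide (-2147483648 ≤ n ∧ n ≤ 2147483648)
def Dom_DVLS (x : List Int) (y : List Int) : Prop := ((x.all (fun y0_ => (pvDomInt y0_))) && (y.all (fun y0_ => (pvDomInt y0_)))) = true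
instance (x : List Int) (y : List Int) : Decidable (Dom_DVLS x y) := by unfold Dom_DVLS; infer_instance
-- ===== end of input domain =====

-- B drops A's padding stage and pairing loop for the closed form (sum y - sum x) % 12 (simpler);
-- A mutates (zero-pads) the shorter input list in place, B does not — equivalence is about the return value only.

-- ===== PORT A =====
def DVLS (x : List Int) (y : List Int) : Int :=
  let p :=
    if x.length > y.length then (x, y ++ List.replicate (x.length - y.length) 0)
    else if y.length > x.length then (x ++ List.replicate (y.length - x.length) 0, y)
    else (x, y)
  let total := (p.1.zip p.2).foldl (fun acc ab => acc + PySem.Int.mod (ab.2 - ab.1) 12) 0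
  PySem.Int.mod total 12

-- ===== PORT B =====
def DVLS_alt (x : List Int) (y : List Int) : Int :=
  PySem.Int.mod (y.sum - x.sum) 12

-- ===== PRECONDITION & SPEC =====
def Spec_DVLS (x : List Int) (y : List Int) (out : Int) : Prop := out = DVLS_alt x y
instance (x : List Int) (y : List Int) (out : Int) : Decidable (Spec_DVLS x y out) := by unfold Spec_DVLS; infer_instance

-- ===== CLAIM =====
def Claim_equal_DVLS : Prop := ∀ (x : List Int) (y : List Int), Dom_DVLS x y → Spec_DVLS x y (DVLS x y)

-- ===== LEMMAS AND PROOFS =====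

lemma foldl_mod12 (l : List (Int × Int)) (t : Int) :
    (l.foldl (fun acc ab => acc + PySem.Int.mod (ab.2 - ab.1) 12) t) % 12
      = (t + (l.map (fun ab => ab.2 - ab.1)).sum) % 12 := by
  induction l generalizing t with
  | nil => simp
  | cons hd tl ih =>
    simp only [List.foldl_cons, List.map_cons, List.sum_cons, ih]
    rw [PySem.Int.mod_eq_emod_of_pos (by norm_num)]
    omega

lemma zip_diff_sum (x y : List Int) (h : x.length = y.length) :
    ((x.zip y).map (fun ab => ab.2 - ab.1)).sum = y.sum - x.sum := by
  induction x generalizing y with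
  | nil => cases y with
    | nil => simp
    | cons b bs => simp at h
  | cons a as ih =>
    cases y with
    | nil => simp at h
    | cons b bs =>
      simp only [List.zip_cons_cons, List.map_cons, List.sum_cons]
      rw [ih bs (by simpa using h)]
      ring

lemma dvls_eq (x y : List Int) : DVLS x y = DVLS_alt x y := by
  unfold DVLS DVLS_alt
  have hlen : ∀ (p : List Int × List Int), p.1.length = p.2.length →
      p.2.sum - p.1.sum = y.sum - x.sum →
      PySem.Int.mod ((p.1.zip p.2).foldl (fun acc ab => acc + PySem.Int.mod (ab.2 - ab.1) 12) 0) 12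
        = PySem.Int.mod (y.sum - x.sum) 12 := by
    intro p hp hs
    rw [PySem.Int.mod_eq_emod_of_pos (by norm_num),
        PySem.Int.mod_eq_emod_of_pos (by norm_num),
        foldl_mod12, zip_diff_sum _ _ hp, hs]
    simp
  by_cases h1 : x.length > y.length
  · simp only [h1, if_true]
    exact hlen (x, y ++ List.replicate (x.length - y.length) 0) (by simp; omega) (by simp)
  · simp only [h1, if_false]
    by_cases h2 : y.length > x.length
    · simp only [h2, if_true]
      exact hlen (x ++ List.replicate (y.length - x.length) 0, y) (by simp; omega) (by simp)
    · simp only [h2, if_false]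
      exact hlen (x, y) (by dsimp only; omega) (by dsimp only)

-- ===== VERDICT =====
theorem DVLS_spec : Claim_equal_DVLS := by
  intro x y _
  exact dvls_eq x y
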